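-- pv_equiv track=rewrite | github.com/JHyuk2/TIL | Python Algorithm/실전 문제/Programmers/kakao_3.py | solution
-- ===== SOURCE A (Python) =====
-- from itertools import combinations, product
--
-- def solution(dice):
--     # 주사위를 챙길 수 있는 가지수
--     dice_num = [i for i in range(len(dice))]
--     combi = list(combinations(dice_num, len(dice_num)//2))
--     mid = len(combi) // 2
--     max_diff = 0
--
--     for i in range(mid):
--         team_A = combi[i]
--         team_B = combi[-i-1]
--         # 모든 경우의 수 찾기.
--         # 먼저 A팀 주사위로 나올 수 있는 모든 경우의 수
--         A_dice = []
--         B_dice = []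
--         for num in team_A:
--             A_dice.append(dice[num])
--         for num in team_B:
--             B_dice.append(dice[num])
--
--         A_product = product(*A_dice)
--         A_product = map(sum, A_product)
--         B_product = product(*B_dice)
--         B_product = map(sum, B_product)
--         res = product(A_product, B_product)
--         res = list(map(lambda x:1 if x[0]-x[1]>0 else 0 if x[0]==x[1] else -1, res))
--
--         diff = res.count(1) - res.count(-1)
--
--         if max_diff < abs(diff):
--             max_diff = abs(diff)
--
--             # A의 승이 더 많은 경우
--             if diff > 0:
--                 answer = team_A
--             else:
--                 answer = team_B
--     answer = list(sorted(map(lambda x:x+1, answer)))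
--     return answer
-- ===== SOURCE B (Python) =====
-- from itertools import combinations
--
--
-- def _team_sums(faces_list):
--     # distribution of sums of one face per die, built by incremental convolution
--     sums = [0]
--     for faces in faces_list:
--         sums = [s + f for s in sums for f in faces]
--     return sums
--
--
-- def _bisect_left(a, x):
--     lo, hi = 0, len(a)
--     while lo < hi:
--         mid = (lo + hi) // 2
--         if a[mid] < x:
--             lo = mid + 1
--         else:
--             hi = mid
--     return lo
--
--
-- def _bisect_right(a, x):
--     lo, hi = 0, len(a)
--     while lo < hi:
--         mid = (lo + hi) // 2
--         if x < a[mid]: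
--             hi = mid
--         else:
--             lo = mid + 1
--     return lo
--
--
-- def solution(dice):
--     n = len(dice)
--     combi = list(combinations(range(n), n // 2))
--     best_diff = 0
--     best = None
--     for i in range(len(combi) // 2):
--         team_A = combi[i]
--         team_B = combi[-i - 1]
--         sums_A = _team_sums([dice[k] for k in team_A])
--         sums_B = sorted(_team_sums([dice[k] for k in team_B]))
--         m = len(sums_B)
--         diff = 0
--         for a in sums_A:
--             diff += _bisect_left(sums_B, a) - (m - _bisect_right(sums_B, a))
--         if best_diff < abs(diff):
--             best_diff = abs(diff)
--             best = team_A if diff > 0 else team_B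
--     return sorted(k + 1 for k in best)
-- ===== Notes on version B (the rewrite author's own statement) =====
-- stated objective: alternative
-- what changed: B keeps A's pairings but replaces the full cross product of outcome tuples (product + map(sum) + pairwise sign list) by per-team sum distributions built by incremental convolution and win/loss counting via binary search on the sorted opponent distribution.
import Mathlib
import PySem

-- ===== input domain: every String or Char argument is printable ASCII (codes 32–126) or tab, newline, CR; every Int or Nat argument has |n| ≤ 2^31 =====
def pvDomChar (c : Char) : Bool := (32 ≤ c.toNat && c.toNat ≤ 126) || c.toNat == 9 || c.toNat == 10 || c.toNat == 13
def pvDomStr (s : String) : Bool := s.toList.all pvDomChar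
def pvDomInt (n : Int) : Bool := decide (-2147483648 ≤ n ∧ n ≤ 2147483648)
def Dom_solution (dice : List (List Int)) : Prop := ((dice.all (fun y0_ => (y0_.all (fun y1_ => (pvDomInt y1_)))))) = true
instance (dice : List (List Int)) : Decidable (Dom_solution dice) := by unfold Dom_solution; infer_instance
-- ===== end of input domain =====

-- B keeps A's pairings but replaces the full cross product of outcome tuples by per-team sum
-- distributions built by incremental convolution and win/loss counting via binary search on the
-- sorted opponent distribution (objective: alternative algorithm, same result).

-- ===== PORT A =====
-- itertools.product(*lists), ported structurally (lexicographic order, first list varies slowest)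
def pyProductA : List (List Int) → List (List Int)
  | [] => [[]]
  | l :: ls => l.flatMap (fun x => (pyProductA ls).map (fun t => x :: t))

-- body of A's `for i in range(mid)` loop; state = (max_diff, answer) with answer None until assigned
def stepA (dice combi : List (List Int)) (st : Int × Option (List Int)) (i : Nat) : Int × Option (List Int) :=
  let teamA := PySem.List.pyGetD combi (i : Int) []
  let teamB := PySem.List.pyGetD combi (-(i : Int) - 1) []
  let aDice := teamA.foldl (fun acc num => acc ++ [PySem.List.pyGetD dice num []]) ([] : List (List Int))
  let bDice := teamB.foldl (fun acc num => acc ++ [PySem.List.pyGetD dice num []]) ([] : List (List Int))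
  let aSums := (pyProductA aDice).map List.sum
  let bSums := (pyProductA bDice).map List.sum
  -- product(A_product, B_product) then the sign lambda
  let res := (aSums.flatMap (fun a => bSums.map (fun b => (a, b)))).map
      (fun x => if x.1 - x.2 > 0 then (1 : Int) else if x.1 = x.2 then (0 : Int) else (-1 : Int))
  let diff : Int := (res.count 1 : Int) - (res.count (-1) : Int)
  if st.1 < |diff| then (|diff|, some (if diff > 0 then teamA else teamB)) else st

def solution (dice : List (List Int)) : List Int :=
  let diceNum := (List.range dice.length).map (fun k => (k : Int))
  let combi := PySem.List.combinations diceNum (dice.length / 2)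
  let mid := combi.length / 2
  let st := (List.range mid).foldl (stepA dice combi) ((0 : Int), (none : Option (List Int)))
  match st.2 with
  | some t => PySem.List.sorted (t.map (fun x => x + 1)) (fun x => x) false
  | none => []  -- Python raises NameError here (`answer` unbound); excluded by Pre_solution

-- ===== PORT B =====
-- Source B's _team_sums: sum distribution by incremental convolution
def teamSumsB (ls : List (List Int)) : List Int :=
  ls.foldl (fun acc faces => acc.flatMap (fun s => faces.map (fun f => s + f))) [0]

-- Source B's _bisect_left/_bisect_right are the standard bisect loops; PySem.List.bisectLeft/bisectRight
-- are their exact ports.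
def stepB (dice combi : List (List Int)) (st : Int × Option (List Int)) (i : Nat) : Int × Option (List Int) :=
  let teamA := PySem.List.pyGetD combi (i : Int) []
  let teamB := PySem.List.pyGetD combi (-(i : Int) - 1) []
  let sumsA := teamSumsB (teamA.map (fun k => PySem.List.pyGetD dice k []))
  let sumsB := PySem.List.sorted (teamSumsB (teamB.map (fun k => PySem.List.pyGetD dice k []))) (fun x => x) false
  let m := sumsB.length
  let diff : Int := sumsA.foldl (fun d a =>
      d + ((PySem.List.bisectLeft sumsB a : Int) - ((m : Int) - (PySem.List.bisectRight sumsB a : Int)))) 0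
  if st.1 < |diff| then (|diff|, some (if diff > 0 then teamA else teamB)) else st

def solution_alt (dice : List (List Int)) : List Int :=
  let combi := PySem.List.combinations ((List.range dice.length).map (fun k => (k : Int))) (dice.length / 2)
  let st := (List.range (combi.length / 2)).foldl (stepB dice combi) ((0 : Int), (none : Option (List Int)))
  match st.2 with
  | some t => PySem.List.sorted (t.map (fun x => x + 1)) (fun x => x) false
  | none => []  -- Source B raises TypeError here (best is None); excluded by Pre_solution

-- ===== PRECONDITION & SPEC =====
-- spec-level helpers for Pre_ (independent of both ports): the sum distribution of a team and the
-- win-minus-loss count of the i-th considered pairing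
def pvSumsOf (dice : List (List Int)) (team : List Int) : List Int :=
  (team.map (fun k => PySem.List.pyGetD dice k [])).foldr
    (fun faces acc => faces.flatMap (fun f => acc.map (fun s => f + s))) [0]

def pvD (As Bs : List Int) : Int :=
  (As.map (fun a => ((Bs.countP (fun b => decide (b < a)) : Int)
                   - (Bs.countP (fun b => decide (a < b)) : Int)))).sum

def pvDiffAt (dice combi : List (List Int)) (i : Nat) : Int :=
  pvD (pvSumsOf dice (PySem.List.pyGetD combi (i : Int) []))
      (pvSumsOf dice (PySem.List.pyGetD combi (-(i : Int) - 1) []))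

-- Pre_ excludes exactly the inputs on which A raises NameError (`answer` is never assigned because
-- no considered pairing has a nonzero win difference, including len(dice) ≤ 1); B raises there too.
def Pre_solution (dice : List (List Int)) : Prop :=
  ∃ i ∈ List.range ((PySem.List.combinations ((List.range dice.length).map (fun k => (k : Int)))
      (dice.length / 2)).length / 2),
    pvDiffAt dice (PySem.List.combinations ((List.range dice.length).map (fun k => (k : Int)))
      (dice.length / 2)) i ≠ 0
instance (dice : List (List Int)) : Decidable (Pre_solution dice) := by unfold Pre_solution; infer_instance

def pvWitness_solution : List (List Int) := [[1], [2]]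

def Spec_solution (dice : List (List Int)) (out : List Int) : Prop := out = solution_alt dice
instance (dice : List (List Int)) (out : List Int) : Decidable (Spec_solution dice out) := by unfold Spec_solution; infer_instance

-- ===== CLAIM (what is proved, stated in full; the proofs are below) =====
def Claim_equal_solution : Prop := ∀ (dice : List (List Int)), Dom_solution dice → Pre_solution dice → Spec_solution dice (solution dice)

-- ===== LEMMAS AND PROOFS =====

theorem sum_map_sub {α : Type} (l : List α) (f g : α → Int) :
    (l.map (fun a => f a - g a)).sum = (l.map f).sum - (l.map g).sum := by
  induction l with
  | nil => simp
  | cons a l ih => simp [ih]; ring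

theorem prodA_sum_cons (l : List Int) (ls : List (List Int)) :
    (pyProductA (l :: ls)).map List.sum
      = l.flatMap (fun x => ((pyProductA ls).map List.sum).map (fun y => x + y)) := by
  simp [pyProductA, List.map_flatMap, List.map_map, Function.comp_def, List.sum_cons]

theorem teamSums_general (ls : List (List Int)) (acc : List Int) :
    ls.foldl (fun acc faces => acc.flatMap (fun s => faces.map (fun f => s + f))) acc
      = acc.flatMap (fun s => ((pyProductA ls).map List.sum).map (fun t => s + t)) := by
  induction ls generalizing acc with
  | nil => simp [pyProductA]
  | cons l ls ih =>
      simp only [List.foldl_cons, ih, prodA_sum_cons, List.flatMap_assoc, List.flatMap_map,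
        List.map_flatMap, List.map_map]
      simp [Function.comp_def, add_assoc]

theorem teamSumsB_eq (ls : List (List Int)) :
    teamSumsB ls = (pyProductA ls).map List.sum := by
  have h := teamSums_general ls [0]
  simpa [teamSumsB] using h

-- counting from a split point: if p holds exactly on the first k positions, countP p = k
theorem countP_of_split (p : Int → Bool) (xs : List Int) (k : Nat) (hk : k ≤ xs.length)
    (h1 : ∀ j (hj : j < xs.length), j < k → p xs[j])
    (h2 : ∀ j (hj : j < xs.length), k ≤ j → ¬ p xs[j]) :
    xs.countP p = k := by
  have hsplit : xs = xs.take k ++ xs.drop k := (List.take_append_drop k xs).symm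
  rw [hsplit, List.countP_append]
  have htake : (xs.take k).countP p = (xs.take k).length := by
    rw [List.countP_eq_length]
    intro a ha
    obtain ⟨j, hj, rfl⟩ := List.mem_iff_getElem.mp ha
    have hj2 : j < k ∧ j < xs.length := by simpa [List.length_take] using hj
    simpa [List.getElem_take] using h1 j hj2.2 hj2.1
  have hdrop : (xs.drop k).countP p = 0 := by
    rw [List.countP_eq_zero]
    intro a ha
    obtain ⟨j, hj, rfl⟩ := List.mem_iff_getElem.mp ha
    have hj2 : j < xs.length - k := by simpa [List.length_drop] using hj
    have hjx : k + j < xs.length := by omega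
    simpa [List.getElem_drop] using h2 (k + j) hjx (Nat.le_add_right k j)
  rw [htake, hdrop, List.length_take]
  omega

theorem bisectLeft_eq_countP (xs : List Int) (hs : List.Pairwise (fun a b => a ≤ b) xs) (a : Int) :
    PySem.List.bisectLeft xs a = xs.countP (fun b => decide (b < a)) := by
  obtain ⟨hle, hlt, hge⟩ := PySem.List.bisectLeft_spec xs a hs
  exact (countP_of_split _ xs _ hle
    (fun j hj hjk => by simpa using hlt j hj hjk)
    (fun j hj hjk => by simpa using not_lt.mpr (hge j hj hjk))).symm

theorem bisectRight_eq_countP (xs : List Int) (hs : List.Pairwise (fun a b => a ≤ b) xs) (a : Int) :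
    PySem.List.bisectRight xs a = xs.countP (fun b => decide (b ≤ a)) := by
  obtain ⟨hle, hlt, hge⟩ := PySem.List.bisectRight_spec xs a hs
  exact (countP_of_split _ xs _ hle
    (fun j hj hjk => by simpa using hlt j hj hjk)
    (fun j hj hjk => by simpa using not_le.mpr (hge j hj hjk))).symm

-- A's per-pair value: cross-product sign counting equals pvD of the two sum distributions
theorem diffA_eq (As Bs : List Int) :
    ((((As.flatMap (fun a => Bs.map (fun b => (a, b)))).map
        (fun x : Int × Int => if x.1 - x.2 > 0 then (1 : Int) else if x.1 = x.2 then (0 : Int) else (-1 : Int))).count 1 : Int)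
     - (((As.flatMap (fun a => Bs.map (fun b => (a, b)))).map
        (fun x : Int × Int => if x.1 - x.2 > 0 then (1 : Int) else if x.1 = x.2 then (0 : Int) else (-1 : Int))).count (-1) : Int))
      = pvD As Bs := by
  have hc1 : ((As.flatMap (fun a => Bs.map (fun b => (a, b)))).map
        (fun x : Int × Int => if x.1 - x.2 > 0 then (1 : Int) else if x.1 = x.2 then (0 : Int) else (-1 : Int))).count 1
      = (As.map (fun a => Bs.countP (fun b => decide (b < a)))).sum := by
    rw [List.count_eq_countP, List.countP_map, List.countP_flatMap]
    congr 1
    apply List.map_congr_left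
    intro a _
    simp only [Function.comp, List.countP_map]
    apply List.countP_congr
    intro b _
    by_cases h1 : a - b > 0 <;> by_cases h2 : a = b <;> simp_all <;> omega
  have hc2 : ((As.flatMap (fun a => Bs.map (fun b => (a, b)))).map
        (fun x : Int × Int => if x.1 - x.2 > 0 then (1 : Int) else if x.1 = x.2 then (0 : Int) else (-1 : Int))).count (-1)
      = (As.map (fun a => Bs.countP (fun b => decide (a < b)))).sum := by
    rw [List.count_eq_countP, List.countP_map, List.countP_flatMap]
    congr 1
    apply List.map_congr_left
    intro a _
    simp only [Function.comp, List.countP_map]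
    apply List.countP_congr
    intro b _
    by_cases h1 : a - b > 0 <;> by_cases h2 : a = b <;> simp_all <;> omega
  rw [hc1, hc2, pvD, sum_map_sub]
  push_cast [Nat.cast_list_sum, List.map_map, Function.comp]
  rfl

-- B's per-pair value: bisect counting on the sorted distribution equals pvD
theorem diffB_eq (As Bs : List Int) :
    As.foldl (fun d a =>
      d + ((PySem.List.bisectLeft (PySem.List.sorted Bs (fun x => x) false) a : Int)
        - (((PySem.List.sorted Bs (fun x => x) false).length : Int)
          - (PySem.List.bisectRight (PySem.List.sorted Bs (fun x => x) false) a : Int)))) 0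
      = pvD As Bs := by
  set SB := PySem.List.sorted Bs (fun x => x) false with hSB
  have hperm : SB.Perm Bs := PySem.List.sorted_perm Bs (fun x => x) false
  have hpw : List.Pairwise (fun a b => a ≤ b) SB := by
    simpa using PySem.List.sorted_pairwise Bs (fun x => x)
  rw [PySem.List.foldl_add]
  rw [pvD]
  simp only [zero_add]
  congr 1
  apply List.map_congr_left
  intro a _
  have hbl := bisectLeft_eq_countP SB hpw a
  have hbr := bisectRight_eq_countP SB hpw a
  have hlen : SB.length = SB.countP (fun b => decide (b ≤ a)) + SB.countP (fun b => decide (a < b)) := by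
    have := List.length_eq_countP_add_countP (l := SB) (fun b => decide (b ≤ a))
    rw [this]
    congr 1
    apply List.countP_congr
    intro b _
    simp [not_le]
  have hplt := hperm.countP_eq (fun b => decide (b < a))
  have hple := hperm.countP_eq (fun b => decide (b ≤ a))
  have hpgt := hperm.countP_eq (fun b => decide (a < b))
  rw [hbl, hbr, hplt] at *
  omega

theorem step_eq (dice combi : List (List Int)) (st : Int × Option (List Int)) (i : Nat) :
    stepA dice combi st i = stepB dice combi st i := by
  unfold stepA stepB
  simp only [PySem.List.foldl_append_singleton_eq_map, List.nil_append, teamSumsB_eq]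
  rw [diffA_eq, diffB_eq]

theorem total_eq (dice : List (List Int)) : solution dice = solution_alt dice := by
  unfold solution solution_alt
  have h : stepA dice (PySem.List.combinations ((List.range dice.length).map (fun k => (k : Int)))
      (dice.length / 2)) = stepB dice (PySem.List.combinations ((List.range dice.length).map (fun k => (k : Int)))
      (dice.length / 2)) := funext fun st => funext fun i => step_eq _ _ st i
  simp only [h]

-- ===== VERDICT (by name: the statement is the Claim_ definition above) =====
theorem solution_spec : Claim_equal_solution := by
  intro dice _ _
  exact total_eq dice
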